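-- pv_equiv track=rewrite | github.com/bl4ck0w1/nuke403 | core/ai_core/payload_gan.py | _is_valid_candidate
-- ===== SOURCE A (Python) =====
-- def _is_valid_candidate(s: str, min_len: int = 4) -> bool:
--     if len(s) < min_len:
--         return False
--     if any(ord(c) < 0x20 and c not in ("\t", "\n", "\r") for c in s):
--         return False
--     trivial = ("aaaa", "////", ";;;;", "----", "%%%%")
--     if any(t in s for t in trivial):
--         return False
--     if not any(c in s for c in ("%", "/", ";", "?", "=", "\\")):
--         return False
--     return True
-- ===== SOURCE B (Python) =====
-- def _is_valid_candidate(s: str, min_len: int = 4) -> bool: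
--     if len(s) < min_len:
--         return False
--     ctrl = special = trivial = False
--     prev = None
--     run = 0
--     for c in s:
--         if ord(c) < 0x20 and c not in "\t\n\r":
--             ctrl = True
--         if c in "%/;?=\\":
--             special = True
--         run = run + 1 if c == prev else 1
--         prev = c
--         if run >= 4 and c in "a/;-%":
--             trivial = True
--     return not ctrl and not trivial and special
-- ===== Notes on version B (the rewrite author's own statement) =====
-- stated objective: alternative
-- what changed: Replaces A's four independent passes (control-char scan, five substring-containment tests, six character-membership tests) with a single left-to-right pass that maintains a control flag, a special-char flag, and a run-length counter detecting the trivial 4-char runs.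
import Mathlib
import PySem

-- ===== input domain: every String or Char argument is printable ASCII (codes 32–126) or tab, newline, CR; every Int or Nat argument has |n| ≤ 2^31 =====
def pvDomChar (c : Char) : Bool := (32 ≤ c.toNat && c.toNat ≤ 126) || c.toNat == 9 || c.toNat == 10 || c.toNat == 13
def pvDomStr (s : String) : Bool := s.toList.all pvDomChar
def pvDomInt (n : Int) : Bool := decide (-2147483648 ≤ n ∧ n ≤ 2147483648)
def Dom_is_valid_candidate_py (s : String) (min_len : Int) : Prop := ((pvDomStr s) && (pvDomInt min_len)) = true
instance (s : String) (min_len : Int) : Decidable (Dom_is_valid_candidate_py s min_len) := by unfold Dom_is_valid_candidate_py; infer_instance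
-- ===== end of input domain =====

-- B replaces A's four independent passes (control-char scan, five substring tests, six membership
-- tests) by a single left-to-right pass keeping three flags and a run-length counter (objective: alternative).

-- ===== PORT A =====
def is_valid_candidate_py (s : String) (min_len : Int) : Bool :=
  if (PySem.Str.len s : Int) < min_len then false
  else if s.toList.any (fun c => decide (c.toNat < 0x20) && !(c == '\t' || c == '\n' || c == '\r')) then false
  else if ["aaaa", "////", ";;;;", "----", "%%%%"].any (fun t => PySem.Str.isIn t s) then false
  else if !(["%", "/", ";", "?", "=", "\\"].any (fun t => PySem.Str.isIn t s)) then false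
  else true

-- ===== PORT B =====
-- the loop of Source B: state = (ctrl, special, trivial) flags plus (prev, run) run-length tracker
def pvAltLoop : List Char → Option Char → Nat → Bool → Bool → Bool → Bool × Bool × Bool
  | [], _, _, ctrl, spec, triv => (ctrl, spec, triv)
  | c :: cs, prev, run, ctrl, spec, triv =>
      let ctrl' := ctrl || (decide (c.toNat < 0x20) && !(c == '\t' || c == '\n' || c == '\r'))
      let spec' := spec || ['%', '/', ';', '?', '=', '\\'].contains c
      let run' := if some c == prev then run + 1 else 1
      let triv' := triv || (decide (4 ≤ run') && ['a', '/', ';', '-', '%'].contains c)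
      pvAltLoop cs (some c) run' ctrl' spec' triv'

def is_valid_candidate_py_alt (s : String) (min_len : Int) : Bool :=
  if (PySem.Str.len s : Int) < min_len then false
  else
    let r := pvAltLoop s.toList none 0 false false false
    !r.1 && !r.2.2 && r.2.1

-- ===== PRECONDITION & SPEC =====
def Spec_is_valid_candidate_py (s : String) (min_len : Int) (out : Bool) : Prop := out = is_valid_candidate_py_alt s min_len
instance (s : String) (min_len : Int) (out : Bool) : Decidable (Spec_is_valid_candidate_py s min_len out) := by unfold Spec_is_valid_candidate_py; infer_instance

-- ===== CLAIM (what is proved, stated in full; the proofs are below) =====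
def Claim_equal_is_valid_candidate_py : Prop := ∀ (s : String) (min_len : Int), Dom_is_valid_candidate_py s min_len → Spec_is_valid_candidate_py s min_len (is_valid_candidate_py s min_len)

-- ===== LEMMAS AND PROOFS =====

-- the trivial-run component of B's loop, in isolation
def pvDetect : List Char → Option Char → Nat → Bool
  | [], _, _ => false
  | c :: cs, prev, run =>
      let run' := if some c == prev then run + 1 else 1
      (decide (4 ≤ run') && ['a', '/', ';', '-', '%'].contains c) || pvDetect cs (some c) run'

lemma pvAltLoop_split (cs : List Char) (prev : Option Char) (run : Nat) (ctrl spec triv : Bool) :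
    pvAltLoop cs prev run ctrl spec triv =
      (ctrl || cs.any (fun c => decide (c.toNat < 0x20) && !(c == '\t' || c == '\n' || c == '\r')),
       spec || cs.any (fun c => ['%', '/', ';', '?', '=', '\\'].contains c),
       triv || pvDetect cs prev run) := by
  induction cs generalizing prev run ctrl spec triv with
  | nil => simp [pvAltLoop, pvDetect]
  | cons c cs ih => simp [pvAltLoop, pvDetect, ih, Bool.or_assoc]

lemma pv_not_infix_of_short {c : Char} {l : List Char} (h : l.length < 4) :
    ¬ (List.replicate 4 c <:+: l) := fun hi => by
  have := hi.length_le; simp at this; omega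

lemma pv_infix_cons {d c : Char} (hdc : d ≠ c) (cs : List Char) :
    (List.replicate 4 d <:+: c :: cs) ↔ (List.replicate 4 d <:+: cs) := by
  rw [List.infix_cons_iff]
  constructor
  · rintro (hp | hi)
    · exfalso
      have h4 : List.replicate 4 d = d :: List.replicate 3 d := rfl
      rw [h4, List.cons_prefix_cons] at hp
      exact hdc hp.1
    · exact hi
  · exact Or.inr

lemma pv_rep_cons (k : Nat) (p : Char) (cs : List Char) :
    List.replicate k p ++ p :: cs = List.replicate (k + 1) p ++ cs := by
  simp [List.replicate_succ', List.append_assoc]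

lemma pv_infix_rep {d p : Char} (hdp : d ≠ p) (k : Nat) (cs : List Char) :
    (List.replicate 4 d <:+: List.replicate k p ++ cs) ↔ (List.replicate 4 d <:+: cs) := by
  induction k with
  | zero => simp
  | succ k ih =>
      have hlist : List.replicate (k + 1) p ++ cs = p :: (List.replicate k p ++ cs) := by
        rw [List.replicate_succ, List.cons_append]
      rw [hlist, pv_infix_cons hdp]
      exact ih

lemma pv_quad_not_prefix {p c : Char} (hpc : c ≠ p) {k : Nat} (hk : k ≤ 3) (cs : List Char) :
    ¬ (List.replicate 4 p <+: List.replicate k p ++ c :: cs) := by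
  intro h
  have hkl : k < (List.replicate 4 p).length := by simp; omega
  have := h.getElem hkl
  rw [List.getElem_replicate] at this
  rw [List.getElem_append_right (by simp)] at this
  simp at this
  exact hpc this.symm

lemma pv_infix_rep_block {p c : Char} (hpc : c ≠ p) {k : Nat} (hk : k ≤ 3) (cs : List Char) :
    (List.replicate 4 p <:+: List.replicate k p ++ c :: cs) ↔ (List.replicate 4 p <:+: cs) := by
  induction k with
  | zero =>
      simp only [List.replicate_zero, List.nil_append]
      exact pv_infix_cons (Ne.symm hpc) cs
  | succ k ih =>
      have hlist : List.replicate (k + 1) p ++ c :: cs = p :: (List.replicate k p ++ c :: cs) := by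
        rw [List.replicate_succ, List.cons_append]
      rw [hlist, List.infix_cons_iff]
      constructor
      · rintro (hp | hi)
        · exact absurd (hlist.symm ▸ hp) (pv_quad_not_prefix hpc hk cs)
        · exact (ih (by omega)).1 hi
      · intro h; exact Or.inr ((ih (by omega)).2 h)

lemma pv_detect_some (cs : List Char) : ∀ (p : Char) (r : Nat),
    pvDetect cs (some p) r = true ↔
      ∃ c ∈ ['a', '/', ';', '-', '%'], List.replicate 4 c <:+: (List.replicate (min r 3) p ++ cs) := by
  induction cs with
  | nil =>
      intro p r
      constructor
      · intro h; simp [pvDetect] at h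
      · rintro ⟨c, _, hi⟩
        exact absurd hi (pv_not_infix_of_short (by
          simp only [List.append_nil, List.length_replicate]; omega))
  | cons c cs ih =>
      intro p r
      by_cases hcp : c = p
      · subst hcp
        have hstep : pvDetect (c :: cs) (some c) r
            = ((decide (4 ≤ r + 1) && ['a', '/', ';', '-', '%'].contains c)
                || pvDetect cs (some c) (r + 1)) := by
          simp [pvDetect]
        rw [hstep]
        by_cases hr : 3 ≤ r
        · have h1 : min r 3 = 3 := by omega
          have h2 : (decide (4 ≤ r + 1)) = true := by simp; omega
          rw [h1, pv_rep_cons 3 c cs, h2, Bool.true_and]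
          by_cases hc : c ∈ ['a', '/', ';', '-', '%']
          · constructor
            · intro _
              exact ⟨c, hc, (List.prefix_append _ _).isInfix⟩
            · intro _
              simp [hc]
          · have hcont : (['a', '/', ';', '-', '%'].contains c) = false := by simpa using hc
            rw [hcont, Bool.false_or]
            rw [ih c (r + 1)]
            have h3 : min (r + 1) 3 = 3 := by omega
            rw [h3]
            apply exists_congr; intro d
            apply and_congr_right; intro hd
            have hdc : d ≠ c := fun h => hc (h ▸ hd)
            rw [pv_infix_rep hdc 4, pv_infix_rep hdc 3]
        · have h1 : min r 3 = r := by omega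
          have h2 : (decide (4 ≤ r + 1)) = false := by simp; omega
          have h3 : min (r + 1) 3 = r + 1 := by omega
          rw [h1, pv_rep_cons r c cs, h2, Bool.false_and, Bool.false_or]
          rw [ih c (r + 1), h3]
      · have hstep : pvDetect (c :: cs) (some p) r = pvDetect cs (some c) 1 := by
          simp [pvDetect, hcp]
        rw [hstep, ih c 1]
        have h1 : min 1 3 = 1 := rfl
        rw [h1]
        simp only [List.replicate_one, List.singleton_append]
        apply exists_congr; intro d
        apply and_congr_right; intro _
        by_cases hdp : d = p
        · subst hdp
          rw [pv_infix_rep_block hcp (Nat.min_le_right r 3) cs, pv_infix_cons (Ne.symm hcp) cs]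
        · rw [pv_infix_rep hdp (min r 3) (c :: cs)]

lemma pv_detect_start (cs : List Char) :
    pvDetect cs none 0 = true ↔ ∃ c ∈ ['a', '/', ';', '-', '%'], List.replicate 4 c <:+: cs := by
  cases cs with
  | nil =>
      constructor
      · intro h; simp [pvDetect] at h
      · rintro ⟨c, _, hi⟩; exact absurd hi (pv_not_infix_of_short (by simp))
  | cons c cs =>
      have hstep : pvDetect (c :: cs) none 0 = pvDetect cs (some c) 1 := by
        simp [pvDetect]
      rw [hstep, pv_detect_some cs c 1]
      simp

lemma pv_singleton_infix {c : Char} {l : List Char} : ([c] <:+: l) ↔ c ∈ l := by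
  constructor
  · intro h; exact h.subset (by simp)
  · intro h
    obtain ⟨s, t, rfl⟩ := List.append_of_mem h
    exact ⟨s, t, by simp⟩

-- ===== VERDICT (by name: the statement is the Claim_ definition above) =====
theorem is_valid_candidate_py_spec : Claim_equal_is_valid_candidate_py := by
  intro s min_len _
  unfold Spec_is_valid_candidate_py is_valid_candidate_py is_valid_candidate_py_alt
  by_cases hlen : (PySem.Str.len s : Int) < min_len
  · rw [if_pos hlen, if_pos hlen]
  · rw [if_neg hlen, if_neg hlen]
    rw [pvAltLoop_split]
    have htriv : (["aaaa", "////", ";;;;", "----", "%%%%"].any (fun t => PySem.Str.isIn t s))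
        = pvDetect s.toList none 0 := by
      rw [Bool.eq_iff_iff, pv_detect_start]
      simp only [List.any_cons, List.any_nil, Bool.or_eq_true, Bool.or_false,
        PySem.Str.isIn_eq, PySem.Chars.isIn_iff_infix]
      constructor
      · rintro (h | h | h | h | h)
        · exact ⟨'a', by simp, by simpa using h⟩
        · exact ⟨'/', by simp, by simpa using h⟩
        · exact ⟨';', by simp, by simpa using h⟩
        · exact ⟨'-', by simp, by simpa using h⟩
        · exact ⟨'%', by simp, by simpa using h⟩
      · rintro ⟨d, hd, hi⟩
        simp only [List.mem_cons, List.not_mem_nil, or_false] at hd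
        rcases hd with rfl | rfl | rfl | rfl | rfl
        · exact Or.inl (by simpa using hi)
        · exact Or.inr (Or.inl (by simpa using hi))
        · exact Or.inr (Or.inr (Or.inl (by simpa using hi)))
        · exact Or.inr (Or.inr (Or.inr (Or.inl (by simpa using hi))))
        · exact Or.inr (Or.inr (Or.inr (Or.inr (by simpa using hi))))
    have hspec : (["%", "/", ";", "?", "=", "\\"].any (fun t => PySem.Str.isIn t s))
        = s.toList.any (fun c => ['%', '/', ';', '?', '=', '\\'].contains c) := by
      rw [Bool.eq_iff_iff]
      simp only [List.any_cons, List.any_nil, Bool.or_eq_true, Bool.or_false,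
        PySem.Str.isIn_eq, PySem.Chars.isIn_iff_infix, List.any_eq_true]
      constructor
      · rintro (h | h | h | h | h | h) <;>
          first
          | exact ⟨'%', pv_singleton_infix.1 (by simpa using h), by simp⟩
          | exact ⟨'/', pv_singleton_infix.1 (by simpa using h), by simp⟩
          | exact ⟨';', pv_singleton_infix.1 (by simpa using h), by simp⟩
          | exact ⟨'?', pv_singleton_infix.1 (by simpa using h), by simp⟩
          | exact ⟨'=', pv_singleton_infix.1 (by simpa using h), by simp⟩
          | exact ⟨'\\', pv_singleton_infix.1 (by simpa using h), by simp⟩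
      · rintro ⟨d, hd, hmem⟩
        have hd' : d ∈ (['%', '/', ';', '?', '=', '\\'] : List Char) := by simpa using hmem
        simp only [List.mem_cons, List.not_mem_nil, or_false] at hd'
        rcases hd' with rfl | rfl | rfl | rfl | rfl | rfl
        · exact Or.inl (by simpa using pv_singleton_infix.2 hd)
        · exact Or.inr (Or.inl (by simpa using pv_singleton_infix.2 hd))
        · exact Or.inr (Or.inr (Or.inl (by simpa using pv_singleton_infix.2 hd)))
        · exact Or.inr (Or.inr (Or.inr (Or.inl (by simpa using pv_singleton_infix.2 hd))))
        · exact Or.inr (Or.inr (Or.inr (Or.inr (Or.inl (by simpa using pv_singleton_infix.2 hd)))))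
        · exact Or.inr (Or.inr (Or.inr (Or.inr (Or.inr (by simpa using pv_singleton_infix.2 hd)))))
    rw [htriv, hspec]
    cases s.toList.any (fun c => decide (c.toNat < 0x20) && !(c == '\t' || c == '\n' || c == '\r')) <;>
      cases pvDetect s.toList none 0 <;>
      cases s.toList.any (fun c => ['%', '/', ';', '?', '=', '\\'].contains c) <;> simp
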